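-- pv_equiv track=rewrite | github.com/Arsen1302/Code-copy-detector | TestData/solutions/problem_1114_4.py | solution_1114_4
-- ===== SOURCE A (Python) =====
-- from typing import List
--
-- def solution_1114_4(inventory: List[int], orders: int) -> int:
--     inventory.sort(reverse=True)
--     inventory.append(0)
--     p = 0
--     for i in range(10**5):
--         if inventory[i]>inventory[i+1]:
--             if (i+1)*(inventory[i]-inventory[i+1])>=orders:
--                 left, right = inventory[i+1]+1, inventory[i]
--                 while left<=right:
--                     mid = (left+right)//2
--                     numBalls = (inventory[i]-mid+1)*(i+1)
--                     if 0<=numBalls-orders<i+1: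
--                         k = numBalls-orders
--                         p += ((inventory[i]+mid)*(inventory[i]-mid+1)//2)*(i+1)-(k*mid)
--                         return p%1000000007
--                     elif numBalls<orders:
--                         right = mid-1
--                     else:
--                         left = mid+1
--             else:
--                 orders -= (i+1)*(inventory[i]-inventory[i+1])
--                 p += ((inventory[i]+inventory[i+1]+1)*(inventory[i]-inventory[i+1])//2)*(i+1)
-- ===== SOURCE B (Python) =====
-- from typing import List
--
-- def solution_1114_4(inventory: List[int], orders: int) -> int:
--     s = sorted(inventory, reverse=True) + [0]
--     p = 0
--     for i in range(len(inventory)):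
--         cur, nxt = s[i], s[i + 1]
--         if cur <= nxt:
--             continue
--         width = i + 1
--         block = width * (cur - nxt)
--         if block < orders:
--             orders -= block
--             p += ((cur + nxt + 1) * (cur - nxt) // 2) * width
--         else:
--             rows = orders // width
--             rem = orders % width
--             p += ((cur + (cur - rows + 1)) * rows // 2) * width + rem * (cur - rows)
--             return p % 1000000007
-- ===== Notes on version B (the rewrite author's own statement) =====
-- stated objective: simpler
-- what changed: B replaces A's inner binary search over the sell-down midpoint by direct integer division (rows = orders // width, rem = orders % width) and iterates only over the actual list indices instead of a hard-coded range(10**5).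
import Mathlib
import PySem

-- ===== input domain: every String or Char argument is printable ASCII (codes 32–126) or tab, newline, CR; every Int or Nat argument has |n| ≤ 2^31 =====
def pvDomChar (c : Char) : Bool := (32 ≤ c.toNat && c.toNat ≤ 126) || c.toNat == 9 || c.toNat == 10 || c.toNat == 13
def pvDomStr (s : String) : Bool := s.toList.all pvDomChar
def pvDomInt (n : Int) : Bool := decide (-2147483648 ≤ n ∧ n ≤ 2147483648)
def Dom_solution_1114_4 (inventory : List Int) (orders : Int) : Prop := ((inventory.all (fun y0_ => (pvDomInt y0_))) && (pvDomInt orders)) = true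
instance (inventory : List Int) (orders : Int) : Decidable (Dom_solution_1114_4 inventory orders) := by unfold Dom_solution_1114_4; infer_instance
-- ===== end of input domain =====

-- B replaces A's inner binary search by direct integer division (rows = orders // width), a simpler
-- closed-form step.  Note: Python A sorts `inventory` in place and appends 0 (observable mutation);
-- B does not mutate its argument — the equivalence proved here is about the RETURN value only.

-- ===== PORT A =====
-- A's inner `while left<=right` binary search; `none` = the while loop exited without returning
-- (control then falls back into A's for loop).
def solnABsearch (width cur orders p left right : Int) (fuel : Nat) : Option Int :=
  match fuel with
  | 0 => none    -- unreachable: the caller passes more fuel than the bracket can consume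
  | fuel + 1 =>
    if left ≤ right then
      let mid := PySem.Int.floordiv (left + right) 2
      let numBalls := (cur - mid + 1) * width
      if 0 ≤ numBalls - orders ∧ numBalls - orders < width then
        some (PySem.Int.mod
          (p + (PySem.Int.floordiv ((cur + mid) * (cur - mid + 1)) 2) * width - (numBalls - orders) * mid)
          1000000007)
      else if numBalls < orders then
        solnABsearch width cur orders p left (mid - 1) fuel
      else
        solnABsearch width cur orders p (mid + 1) right fuel
    else none

-- A's `for i in range(10**5)` loop; fuel counts the remaining range iterations,
-- `none` = Python's IndexError (out-of-range `inventory[i]`) or falling off the range (A returns None).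
def solnALoop (s : List Int) (orders p : Int) (i fuel : Nat) : Option Int :=
  match fuel with
  | 0 => none
  | fuel + 1 =>
    match PySem.List.pyGet? s (i : Int), PySem.List.pyGet? s ((i : Int) + 1) with
    | some cur, some nxt =>
      if nxt < cur then
        if orders ≤ ((i : Int) + 1) * (cur - nxt) then
          match solnABsearch ((i : Int) + 1) cur orders p (nxt + 1) cur ((cur - nxt + 1).toNat) with
          | some r => some r
          | none => solnALoop s orders p (i + 1) fuel
        else
          solnALoop s (orders - ((i : Int) + 1) * (cur - nxt))
            (p + (PySem.Int.floordiv ((cur + nxt + 1) * (cur - nxt)) 2) * ((i : Int) + 1))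
            (i + 1) fuel
      else solnALoop s orders p (i + 1) fuel
    | _, _ => none

def solution_1114_4 (inventory : List Int) (orders : Int) : Int :=
  let s := PySem.List.sorted inventory (fun x => x) true ++ [0]
  (solnALoop s orders 0 0 100000).getD 0

-- ===== PORT B =====
-- B's `for i in range(len(inventory))` loop; indices are always in range in B's Python, so
-- List.getD is exact here; `none` = falling off the loop (B returns None, outside Pre_).
def solnBLoop (s : List Int) (orders p : Int) (i k : Nat) : Option Int :=
  match k with
  | 0 => none    -- loop over, Python B returns None (outside Pre_)
  | k + 1 =>
    let cur := s.getD i 0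
    let nxt := s.getD (i + 1) 0
    if cur ≤ nxt then solnBLoop s orders p (i + 1) k
    else
      let width : Int := (i : Int) + 1
      let block := width * (cur - nxt)
      if block < orders then
        solnBLoop s (orders - block)
          (p + (PySem.Int.floordiv ((cur + nxt + 1) * (cur - nxt)) 2) * width) (i + 1) k
      else
        let rows := PySem.Int.floordiv orders width
        let rem := PySem.Int.mod orders width
        some (PySem.Int.mod
          (p + (PySem.Int.floordiv ((cur + (cur - rows + 1)) * rows) 2) * width + rem * (cur - rows))
          1000000007)

def solution_1114_4_alt (inventory : List Int) (orders : Int) : Int :=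
  let s := PySem.List.sorted inventory (fun x => x) true ++ [0]
  (solnBLoop s orders 0 0 inventory.length).getD 0

-- ===== PRECONDITION & SPEC =====
-- Exactly the inputs on which Python A returns normally: A raises IndexError when orders ≤ 0 or
-- orders exceeds the total sellable amount  sum − n·min(0, min inventory), and returns None (not an
-- int) when the answer lies beyond its hard-coded range(10**5) — possible only for lists longer
-- than 10**5 elements, hence the length bound.
def Pre_solution_1114_4 (inventory : List Int) (orders : Int) : Prop :=
  1 ≤ orders ∧
  orders ≤ inventory.sum - (inventory.length : Int) * (inventory.foldr min 0) ∧
  inventory.length ≤ 100000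

instance (inventory : List Int) (orders : Int) : Decidable (Pre_solution_1114_4 inventory orders) := by
  unfold Pre_solution_1114_4; infer_instance

def pvWitness_solution_1114_4 : List Int × Int := ([2, 5], 4)

def Spec_solution_1114_4 (inventory : List Int) (orders : Int) (out : Int) : Prop := out = solution_1114_4_alt inventory orders
instance (inventory : List Int) (orders : Int) (out : Int) : Decidable (Spec_solution_1114_4 inventory orders out) := by unfold Spec_solution_1114_4; infer_instance

-- ===== CLAIM (what is proved, stated in full; the proofs are below) =====
def Claim_equal_solution_1114_4 : Prop := ∀ (inventory : List Int) (orders : Int), Dom_solution_1114_4 inventory orders → Pre_solution_1114_4 inventory orders → Spec_solution_1114_4 inventory orders (solution_1114_4 inventory orders)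

-- ===== LEMMAS AND PROOFS =====

-- A's binary search, started on any bracket [left, right] that contains the target midpoint
-- tgt = cur − rows (+1 if orders divides evenly), returns exactly B's closed-form value.
theorem solnABsearch_eq (width cur orders p : Int)
    (hw : 0 < width) :
    ∀ (fuelN : Nat) (left right : Int),
      (right + 1 - left).toNat < fuelN →
      left ≤ (if PySem.Int.mod orders width = 0
              then cur - PySem.Int.floordiv orders width + 1
              else cur - PySem.Int.floordiv orders width) →
      (if PySem.Int.mod orders width = 0
              then cur - PySem.Int.floordiv orders width + 1
              else cur - PySem.Int.floordiv orders width) ≤ right →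
      solnABsearch width cur orders p left right fuelN =
        some (PySem.Int.mod
          (p + (PySem.Int.floordiv
                  ((cur + (cur - PySem.Int.floordiv orders width + 1)) * (PySem.Int.floordiv orders width)) 2)
               * width
             + (PySem.Int.mod orders width) * (cur - PySem.Int.floordiv orders width))
          1000000007) := by
  intro fuelN
  set rows := PySem.Int.floordiv orders width with hrowsdef
  set rem := PySem.Int.mod orders width with hremdef
  have hdm : rows * width + rem = orders := PySem.Int.floordiv_mul_add_mod orders width
  have hr0 : 0 ≤ rem := PySem.Int.mod_nonneg orders hw
  have hr1 : rem < width := PySem.Int.mod_lt orders hw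
  induction fuelN with
  | zero =>
    intro left right hf hl hr
    omega
  | succ fuelN ih =>
    intro left right hf hl hr
    have hlr : left ≤ right := le_trans hl hr
    rw [solnABsearch]
    simp only [if_pos hlr]
    have hmb := PySem.Int.floordiv_two_mid_bounds hlr
    set m := PySem.Int.floordiv (left + right) 2 with hmdef
    have hnb : (cur - m + 1) * width - orders = (cur - m + 1 - rows) * width - rem := by
      rw [← hdm]; ring
    set d := cur - m + 1 - rows with hddef
    by_cases hc : 0 ≤ (cur - m + 1) * width - orders ∧ (cur - m + 1) * width - orders < width
    · rw [if_pos hc]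
      obtain ⟨hc1, hc2⟩ := hc
      rw [hnb] at hc1 hc2
      have hd : (d = 0 ∧ rem = 0) ∨ (d = 1 ∧ 0 < rem) := by
        rcases lt_trichotomy d 0 with h | h | h
        · exfalso
          have : d * width ≤ -width := by nlinarith
          linarith
        · left
          refine ⟨h, ?_⟩
          rw [h] at hc1; simp at hc1; omega
        · rcases lt_or_ge d 2 with h2 | h2
          · right
            have hd1 : d = 1 := by omega
            refine ⟨hd1, ?_⟩
            rw [hd1] at hc2
            nlinarith
          · exfalso
            have : 2 * width ≤ d * width := by nlinarith
            linarith
      rcases hd with ⟨hd0, hrem0⟩ | ⟨hd1, hrempos⟩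
      · have hm : m = cur - rows + 1 := by omega
        have hk : (cur - m + 1) * width - orders = 0 := by
          rw [hnb, hd0, hrem0]; ring
        have harg : (cur + m) * (cur - m + 1) = (cur + (cur - rows + 1)) * rows := by
          rw [hm]; ring
        rw [hk, harg, hrem0]; show some _ = some _
        exact congrArg (fun z => some (PySem.Int.mod z 1000000007)) (by ring)
      · have hm : m = cur - rows := by omega
        have hk : (cur - m + 1) * width - orders = width - rem := by
          rw [hnb, hd1]; ring
        have harg : (cur + m) * (cur - m + 1) = (cur + (cur - rows + 1)) * rows + (cur - rows) * 2 := by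
          rw [hm]; ring
        have hfd : PySem.Int.floordiv ((cur + (cur - rows + 1)) * rows + (cur - rows) * 2) 2
            = PySem.Int.floordiv ((cur + (cur - rows + 1)) * rows) 2 + (cur - rows) := by
          rw [PySem.Int.floordiv_eq_ediv_of_pos (by norm_num),
              PySem.Int.floordiv_eq_ediv_of_pos (by norm_num)]
          exact Int.add_mul_ediv_right _ _ (by norm_num)
        rw [hk, harg, hfd, hm]
        exact congrArg (fun z => some (PySem.Int.mod z 1000000007)) (by ring)
    · rw [if_neg hc]
      by_cases hlt : (cur - m + 1) * width < orders
      · rw [if_pos hlt]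
        have hdw : d * width - rem < 0 := by
          rw [← hnb]; omega
        have hd_le : d ≤ 0 := by
          by_contra h
          have h1 : 1 ≤ d := by omega
          have : width ≤ d * width := by nlinarith
          linarith
        have htgt : (if rem = 0 then cur - rows + 1 else cur - rows) ≤ m - 1 := by
          rcases eq_or_lt_of_le hd_le with he | hlt2
          · have hrpos : 0 < rem := by
              rw [he] at hdw; simp at hdw; omega
            rw [if_neg (by omega)]
            omega
          · split <;> omega
        exact ih left (m - 1) (by omega) hl htgt
      · rw [if_neg hlt]
        rw [not_lt] at hlt
        have hge : width ≤ (cur - m + 1) * width - orders := by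
          rcases not_and_or.mp hc with h | h
          · omega
          · omega
        rw [hnb] at hge
        have hd_ge : 1 ≤ d := by
          by_contra h
          have h1 : d ≤ 0 := by omega
          have : d * width ≤ 0 := by nlinarith
          linarith
        have htgt : m + 1 ≤ (if rem = 0 then cur - rows + 1 else cur - rows) := by
          rcases eq_or_lt_of_le hd_ge with he | h2
          · have hrem0 : rem = 0 := by
              rw [← he] at hge; simp at hge; omega
            rw [if_pos hrem0]
            omega
          · split <;> omega
        exact ih (m + 1) right (by omega) htgt hr

-- Step-by-step equality of A's range(10**5) loop with B's range(n) loop on the shared sorted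
-- sentinel list s (s.length = n + 1), as Options; only 0 < orders is needed.
theorem loop_eq (s : List Int) (n : Nat) (hs : s.length = n + 1) (hn : n ≤ 100000) :
    ∀ (fuel i : Nat) (orders p : Int), i + fuel = 100000 → i ≤ n → 0 < orders →
      solnALoop s orders p i fuel = solnBLoop s orders p i (n - i) := by
  intro fuel
  induction fuel with
  | zero =>
    intro i orders p hif hin ho
    have hii : i = n := by omega
    rw [solnALoop, show n - i = 0 by omega, solnBLoop]
  | succ fuel ih =>
    intro i orders p hif hin ho
    rcases Nat.lt_or_ge i n with hlt | hge
    · have hi0 : i < s.length := by omega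
      have hi1 : i + 1 < s.length := by omega
      have hA : PySem.List.pyGet? s (i : Int) = some s[i] := by
        rw [PySem.List.pyGet?_natCast]
        exact List.getElem?_eq_getElem hi0
      have hA1 : PySem.List.pyGet? s ((i : Int) + 1) = some s[i + 1] := by
        rw [show ((i : Int) + 1) = ((i + 1 : Nat) : Int) by push_cast; ring,
            PySem.List.pyGet?_natCast]
        exact List.getElem?_eq_getElem hi1
      have hg0 : s.getD i 0 = s[i] := by
        rw [List.getD_eq_getElem?_getD, List.getElem?_eq_getElem hi0]; rfl
      have hg1 : s.getD (i + 1) 0 = s[i + 1] := by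
        rw [List.getD_eq_getElem?_getD, List.getElem?_eq_getElem hi1]; rfl
      rw [solnALoop, show n - i = (n - (i + 1)) + 1 by omega, solnBLoop]
      simp only [hA, hA1, hg0, hg1]
      by_cases hcmp : s[i + 1] < s[i]
      · rw [if_pos hcmp, if_neg (not_le.mpr hcmp)]
        by_cases hb : orders ≤ ((i : Int) + 1) * (s[i] - s[i + 1])
        · rw [if_pos hb, if_neg (not_lt.mpr hb)]
          have hwpos : (0 : Int) < (i : Int) + 1 := by positivity
          have hdm := PySem.Int.floordiv_mul_add_mod orders ((i : Int) + 1)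
          have hr0 : 0 ≤ PySem.Int.mod orders ((i : Int) + 1) :=
            PySem.Int.mod_nonneg orders hwpos
          have hr1 : PySem.Int.mod orders ((i : Int) + 1) < (i : Int) + 1 :=
            PySem.Int.mod_lt orders hwpos
          set rows := PySem.Int.floordiv orders ((i : Int) + 1) with hrowsdef
          set rem := PySem.Int.mod orders ((i : Int) + 1) with hremdef
          have hrows0 : 0 ≤ rows := by
            by_contra h
            have h1 : rows ≤ -1 := by omega
            have : rows * ((i : Int) + 1) ≤ -((i : Int) + 1) := by nlinarith
            omega
          have hrowsle : rows ≤ s[i] - s[i + 1] := by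
            by_contra h
            have h1 : s[i] - s[i + 1] + 1 ≤ rows := by omega
            have : (s[i] - s[i + 1] + 1) * ((i : Int) + 1) ≤ rows * ((i : Int) + 1) := by
              nlinarith
            nlinarith
          have hbr : s[i + 1] + 1 ≤ (if rem = 0 then s[i] - rows + 1 else s[i] - rows) ∧
              (if rem = 0 then s[i] - rows + 1 else s[i] - rows) ≤ s[i] := by
            by_cases hrem : rem = 0
            · have hrows1 : 1 ≤ rows := by
                rcases (by omega : rows = 0 ∨ 1 ≤ rows) with h0 | h1
                · rw [h0] at hdm; simp at hdm; omega
                · exact h1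
              omega
            · have : rows < s[i] - s[i + 1] := by
                rcases eq_or_lt_of_le hrowsle with he | h2
                · exfalso
                  have hcomm : rows * ((i : Int) + 1) = ((i : Int) + 1) * (s[i] - s[i + 1]) := by
                    rw [he]; ring
                  omega
                · exact h2
              omega
          rw [solnABsearch_eq ((i : Int) + 1) s[i] orders p hwpos
                ((s[i] - s[i + 1] + 1).toNat) (s[i + 1] + 1) s[i]
                (by omega) hbr.1 hbr.2]
        · rw [if_neg hb, if_pos (not_le.mp hb)]
          exact ih (i + 1) _ _ (by omega) (by omega) (by omega)
      · rw [if_neg hcmp, if_pos (not_lt.mp hcmp)]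
        exact ih (i + 1) orders p (by omega) (by omega) ho
    · have hnone : PySem.List.pyGet? s ((i : Int) + 1) = none := by
        rw [show ((i : Int) + 1) = ((i + 1 : Nat) : Int) by push_cast; ring,
            PySem.List.pyGet?_natCast]
        exact List.getElem?_eq_none (by omega)
      rw [solnALoop, show n - i = 0 by omega, solnBLoop]
      simp only [hnone]
      cases h : PySem.List.pyGet? s ((i : Nat) : Int) <;> simp

-- ===== VERDICT (by name: the statement is the Claim_ definition above) =====
theorem solution_1114_4_spec : Claim_equal_solution_1114_4 := by
  intro inventory orders _ hpre
  unfold Spec_solution_1114_4 solution_1114_4 solution_1114_4_alt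
  obtain ⟨h1, _, h3⟩ := hpre
  show (solnALoop (PySem.List.sorted inventory (fun x => x) true ++ [0]) orders 0 0 100000).getD 0
      = (solnBLoop (PySem.List.sorted inventory (fun x => x) true ++ [0]) orders 0 0 inventory.length).getD 0
  have hs : (PySem.List.sorted inventory (fun x => x) true ++ [0]).length = inventory.length + 1 := by
    simp [PySem.List.length_sorted]
  rw [loop_eq _ _ hs h3 100000 0 orders 0 rfl (Nat.zero_le _) h1, Nat.sub_zero]
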